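-- pv_equiv track=rewrite | github.com/Cory7666/university | semester_7/TBoCD/src/4/matrixops.py | make_gramar
-- ===== SOURCE A (Python) =====
-- from typing import List
--
-- BoolSquareMatrix = List[List[bool]]
--
-- GramarMatrix = List[List[str]]
--
-- def make_gramar(eq: BoolSquareMatrix, lt_dot: BoolSquareMatrix, dot_gt: BoolSquareMatrix) -> GramarMatrix:
--     n = len(eq)
--     return [[
--         ('=' if eq[row][col] else (
--             '<' if lt_dot[row][col] else (
--                 '>' if dot_gt[row][col] else '_'
--             ))) for col in range(n)
--     ] for row in range(n)]
-- ===== SOURCE B (Python) =====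
-- def make_gramar(eq, lt_dot, dot_gt):
--     n = len(eq)
--     out = [['_'] * n for _ in range(n)]
--     for sym, mat in (('>', dot_gt), ('<', lt_dot), ('=', eq)):
--         out = [[sym if mat[r][c] else out[r][c] for c in range(n)] for r in range(n)]
--     return out
-- ===== Notes on version B (the rewrite author's own statement) =====
-- stated objective: alternative
-- what changed: B builds a grid prefilled with '_' and overwrites it in three full passes in reverse priority order ('>' then '<' then '='), instead of A's single nested conditional per cell.
-- outside the precondition, e.g. on make_gramar([[True]], [], []): A returns [['=']], B raises IndexError
import Mathlib
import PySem

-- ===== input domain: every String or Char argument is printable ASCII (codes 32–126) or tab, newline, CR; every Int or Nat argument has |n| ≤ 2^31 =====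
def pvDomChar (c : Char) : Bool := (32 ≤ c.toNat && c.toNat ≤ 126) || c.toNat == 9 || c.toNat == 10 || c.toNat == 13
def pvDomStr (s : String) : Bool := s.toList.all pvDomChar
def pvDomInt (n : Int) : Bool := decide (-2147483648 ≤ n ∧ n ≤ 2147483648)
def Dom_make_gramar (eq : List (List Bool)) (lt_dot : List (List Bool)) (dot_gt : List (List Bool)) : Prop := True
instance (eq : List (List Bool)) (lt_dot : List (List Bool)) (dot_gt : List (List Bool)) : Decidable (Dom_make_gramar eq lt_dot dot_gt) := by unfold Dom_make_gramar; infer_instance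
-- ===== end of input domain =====

-- B builds the grid prefilled with '_' and overwrites it in three full passes in reverse
-- priority order ('>' then '<' then '='), instead of A's single nested conditional per cell.


-- ===== PORT A =====
-- indexing eq[row][col] etc.: exact via pyGetD since Pre_make_gramar keeps every access in range
def make_gramar (eq : List (List Bool)) (lt_dot : List (List Bool)) (dot_gt : List (List Bool)) : List (List String) :=
  let n : Int := eq.length
  (PySem.List.pyRange 0 n 1).map fun row =>
    (PySem.List.pyRange 0 n 1).map fun col =>
      if PySem.List.pyGetD (PySem.List.pyGetD eq row []) col false then "="
      else if PySem.List.pyGetD (PySem.List.pyGetD lt_dot row []) col false then "<"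
      else if PySem.List.pyGetD (PySem.List.pyGetD dot_gt row []) col false then ">"
      else "_"

-- ===== PORT B =====
-- one overwrite pass: out' = [[sym if mat[r][c] else out[r][c] for c in range(n)] for r in range(n)]
def pvStamp (n : Int) (sym : String) (mat : List (List Bool)) (out : List (List String)) : List (List String) :=
  (PySem.List.pyRange 0 n 1).map fun r =>
    (PySem.List.pyRange 0 n 1).map fun c =>
      if PySem.List.pyGetD (PySem.List.pyGetD mat r []) c false then sym
      else PySem.List.pyGetD (PySem.List.pyGetD out r []) c "_"

def make_gramar_alt (eq : List (List Bool)) (lt_dot : List (List Bool)) (dot_gt : List (List Bool)) : List (List String) :=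
  let n : Int := eq.length
  let out := List.replicate eq.length (List.replicate eq.length "_")
  pvStamp n "=" eq (pvStamp n "<" lt_dot (pvStamp n ">" dot_gt out))

-- ===== PRECONDITION & SPEC =====
-- Pre_ excludes inputs on which some eq/lt_dot/dot_gt row needed by the n×n scan is missing or
-- too short: A raises IndexError there, except when eq's True short-circuits the access — a
-- degenerate corner where B (which reads all three matrices in full) raises instead.
def Pre_make_gramar (eq : List (List Bool)) (lt_dot : List (List Bool)) (dot_gt : List (List Bool)) : Prop :=
  eq.length ≤ lt_dot.length ∧ eq.length ≤ dot_gt.length ∧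
  ∀ r < eq.length, eq.length ≤ (eq.getD r []).length ∧
    eq.length ≤ (lt_dot.getD r []).length ∧ eq.length ≤ (dot_gt.getD r []).length
instance (eq : List (List Bool)) (lt_dot : List (List Bool)) (dot_gt : List (List Bool)) : Decidable (Pre_make_gramar eq lt_dot dot_gt) := by unfold Pre_make_gramar; infer_instance

def pvWitness_make_gramar : List (List Bool) × List (List Bool) × List (List Bool) :=
  ([[true, false], [false, false]], [[false, true], [false, false]], [[false, false], [true, false]])

def Spec_make_gramar (eq : List (List Bool)) (lt_dot : List (List Bool)) (dot_gt : List (List Bool)) (out : List (List String)) : Prop := out = make_gramar_alt eq lt_dot dot_gt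
instance (eq : List (List Bool)) (lt_dot : List (List Bool)) (dot_gt : List (List Bool)) (out : List (List String)) : Decidable (Spec_make_gramar eq lt_dot dot_gt out) := by unfold Spec_make_gramar; infer_instance

-- ===== CLAIM (what is proved, stated in full; the proofs are below) =====
def Claim_equal_make_gramar : Prop := ∀ (eq : List (List Bool)) (lt_dot : List (List Bool)) (dot_gt : List (List Bool)), Dom_make_gramar eq lt_dot dot_gt → Pre_make_gramar eq lt_dot dot_gt → Spec_make_gramar eq lt_dot dot_gt (make_gramar eq lt_dot dot_gt)

-- ===== LEMMAS AND PROOFS =====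

-- a cell of one stamping pass, for in-range indices
theorem pvStamp_cell (n : Int) (sym : String) (mat : List (List Bool))
    (out : List (List String)) (r c : Int) (hr0 : 0 ≤ r) (hrn : r < n) (hc0 : 0 ≤ c) (hcn : c < n) :
    PySem.List.pyGetD (PySem.List.pyGetD (pvStamp n sym mat out) r []) c "_" =
      (if PySem.List.pyGetD (PySem.List.pyGetD mat r []) c false then sym
       else PySem.List.pyGetD (PySem.List.pyGetD out r []) c "_") := by
  unfold pvStamp
  rw [PySem.List.pyGetD_map_pyRange_of_nonneg _ n r _ hr0 hrn,
      PySem.List.pyGetD_map_pyRange_of_nonneg _ n c _ hc0 hcn]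

-- a cell of the background grid is "_"
theorem pvBase_cell (m : Nat) (r c : Int) (hr0 : 0 ≤ r) (hrn : r < (m : Int))
    (hc0 : 0 ≤ c) (hcn : c < (m : Int)) :
    PySem.List.pyGetD (PySem.List.pyGetD (List.replicate m (List.replicate m "_")) r []) c "_" = "_" := by
  obtain ⟨rn, rfl⟩ := Int.eq_ofNat_of_zero_le hr0
  obtain ⟨cn, rfl⟩ := Int.eq_ofNat_of_zero_le hc0
  have hr : rn < m := by exact_mod_cast hrn
  have hc : cn < m := by exact_mod_cast hcn
  simp [PySem.List.pyGetD_natCast, List.getD_eq_getElem?_getD, hr, hc]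

theorem make_gramar_spec_aux (eq lt_dot dot_gt : List (List Bool)) :
    make_gramar eq lt_dot dot_gt = make_gramar_alt eq lt_dot dot_gt := by
  unfold make_gramar make_gramar_alt
  refine List.map_congr_left (fun r hr => ?_)
  refine List.map_congr_left (fun c hc => ?_)
  rw [PySem.List.mem_pyRange_one] at hr hc
  rw [pvStamp_cell _ _ _ _ r c hr.1 hr.2 hc.1 hc.2,
      pvStamp_cell _ _ _ _ r c hr.1 hr.2 hc.1 hc.2,
      pvBase_cell _ r c hr.1 hr.2 hc.1 hc.2]

-- ===== VERDICT (by name: the statement is the Claim_ definition above) =====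
theorem make_gramar_spec : Claim_equal_make_gramar := by
  intro eq lt_dot dot_gt _ _
  exact make_gramar_spec_aux eq lt_dot dot_gt
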